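-- pv_equiv track=rewrite | github.com/zsh1995/stock | macd_calc.py | calc_across
-- ===== SOURCE A (Python) =====
-- def calc_across(macd_short, macd_long, term = 12):
--     N = len(macd_short)
--     pre_flag = True
--     unacross = [0 for i in range(N)]
--     across_day = []
--     for i in range(N):
--         s = macd_short[i]
--         l = macd_long[i]
--         crtflag = s > l
--         if crtflag != pre_flag:
--             across_day.append(i)
--         # unacross day is longger than term
--         if len(across_day) >= 1 and i - across_day[-1] >= term and crtflag == pre_flag:
--             unacross[i] = 1
--         # across more than twice in term
--         elif len(across_day) >= 2 and i - across_day[-2] <= term: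
--             unacross[i] = 2
--         pre_flag = crtflag
--     return unacross
-- ===== SOURCE B (Python) =====
-- def calc_across(macd_short, macd_long, term=12):
--     # Segment the series into maximal runs of the short>long relation
--     # (virtually preceded by True), then bulk-fill each run's output by
--     # closed-form index intervals instead of testing conditions per day.
--     N = len(macd_short)
--     out = [0] * N
--     starts = []          # run starts = crossover days
--     prev = True
--     for i in range(N):
--         f = macd_short[i] > macd_long[i]
--         if f != prev:
--             starts.append(i)
--         prev = f
--     starts.append(N)     # sentinel end of the last run
--     for k in range(len(starts) - 1):
--         c, nxt = starts[k], starts[k + 1]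
--         # '1' zone: run interior at distance >= term from the run's crossover
--         for i in range(max(c + term, c + 1), nxt):
--             out[i] = 1
--         if k >= 1:
--             p = starts[k - 1]
--             # '2' at the crossover itself when within term of the previous one
--             if c - p <= term:
--                 out[c] = 2
--             # '2' zone: interior days still within term of the previous crossover
--             for i in range(c + 1, min(c + term, p + term + 1, nxt)):
--                 out[i] = 2
--     return out
-- ===== Notes on version B (the rewrite author's own statement) =====
-- stated objective: alternative
-- what changed: A tests the 1/2 conditions day by day inside one loop carrying pre_flag and a growing across_day list; B segments the series into maximal runs of the short>long relation and bulk-fills each run's output with closed-form index intervals (a 1-zone and 2-zones computed arithmetically from the run boundaries), so the per-day condition tests disappear.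
import Mathlib
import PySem

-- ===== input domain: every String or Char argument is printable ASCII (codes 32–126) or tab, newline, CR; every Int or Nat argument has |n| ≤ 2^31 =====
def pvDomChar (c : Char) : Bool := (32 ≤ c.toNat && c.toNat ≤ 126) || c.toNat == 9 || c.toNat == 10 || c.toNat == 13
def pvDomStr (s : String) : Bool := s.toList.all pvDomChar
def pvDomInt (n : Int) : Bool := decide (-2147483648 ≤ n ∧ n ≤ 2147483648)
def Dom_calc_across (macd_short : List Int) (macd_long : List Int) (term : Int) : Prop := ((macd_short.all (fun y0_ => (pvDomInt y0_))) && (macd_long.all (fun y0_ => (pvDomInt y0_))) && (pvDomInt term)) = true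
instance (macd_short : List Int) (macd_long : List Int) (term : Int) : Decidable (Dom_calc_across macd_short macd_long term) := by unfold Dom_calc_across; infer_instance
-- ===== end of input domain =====

-- B replaces A's per-day conditional loop (pre_flag + growing across_day list) by
-- run-length segmentation plus closed-form interval fills per run; objective: alternative
-- decomposition (same O(n) cost).


-- ===== PORT A =====
-- Loop body of A; across_day is kept newest-first (Python append = cons here,
-- across_day[-1] = getD 0, across_day[-2] = getD 1).
def calcAcrossStep (macd_short : List Int) (macd_long : List Int) (term : Int)
    (st : Bool × List Int × List Nat) (i : Nat) : Bool × List Int × List Nat :=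
  let pre_flag := st.1
  let unacross := st.2.1
  let across_day := st.2.2
  let s := macd_short.getD i 0
  let l := macd_long.getD i 0
  let crtflag := decide (s > l)
  let across_day := if crtflag != pre_flag then i :: across_day else across_day
  let unacross :=
    if 1 ≤ across_day.length ∧ (i : Int) - (across_day.getD 0 0 : Int) ≥ term ∧ crtflag = pre_flag then
      unacross.set i 1
    else if 2 ≤ across_day.length ∧ (i : Int) - (across_day.getD 1 0 : Int) ≤ term then
      unacross.set i 2
    else unacross
  (crtflag, unacross, across_day)

def calc_across (macd_short : List Int) (macd_long : List Int) (term : Int) : List Int :=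
  ((List.range macd_short.length).foldl (calcAcrossStep macd_short macd_long term)
    (true, List.replicate macd_short.length 0, [])).2.1

-- ===== PORT B =====
-- B's first loop: collect the run starts (crossover days), initial relation True.
def altStartsStep (macd_short : List Int) (macd_long : List Int)
    (st : Bool × List Int) (i : Nat) : Bool × List Int :=
  let f := decide (macd_short.getD i 0 > macd_long.getD i 0)
  (f, if f != st.1 then st.2 ++ [(i : Int)] else st.2)

def altStarts (macd_short : List Int) (macd_long : List Int) : List Int :=
  ((List.range macd_short.length).foldl (altStartsStep macd_short macd_long) (true, [])).2
    ++ [(macd_short.length : Int)]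

-- 'for i in range(a, b): out[i] = v'
def altFill (v : Int) (a b : Int) (out : List Int) : List Int :=
  (PySem.List.pyRange a b 1).foldl (fun o i => o.set i.toNat v) out

-- B's per-run body: fill the run [c, nxt) by closed-form intervals.
def altSegStep (term : Int) (starts : List Int) (out : List Int) (k : Nat) : List Int :=
  let c := starts.getD k 0
  let nxt := starts.getD (k+1) 0
  let out := altFill 1 (max (c + term) (c + 1)) nxt out
  if 1 ≤ k then
    let p := starts.getD (k-1) 0
    let out := if c - p ≤ term then out.set c.toNat 2 else out
    altFill 2 (c + 1) (min (min (c + term) (p + term + 1)) nxt) out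
  else out

def calc_across_alt (macd_short : List Int) (macd_long : List Int) (term : Int) : List Int :=
  let starts := altStarts macd_short macd_long
  (List.range (starts.length - 1)).foldl (altSegStep term starts)
    (List.replicate macd_short.length 0)

-- ===== PRECONDITION & SPEC =====
-- Python A indexes macd_long[i] for every i < len(macd_short); it raises IndexError
-- when macd_long is shorter, so exactly those inputs are excluded.
def Pre_calc_across (macd_short : List Int) (macd_long : List Int) (term : Int) : Prop :=
  macd_short.length ≤ macd_long.length
instance (macd_short : List Int) (macd_long : List Int) (term : Int) : Decidable (Pre_calc_across macd_short macd_long term) := by unfold Pre_calc_across; infer_instance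

def pvWitness_calc_across : List Int × List Int × Int := ([1, 0, 2, 0], [0, 1, 1, 1], 2)

def Spec_calc_across (macd_short : List Int) (macd_long : List Int) (term : Int) (out : List Int) : Prop := out = calc_across_alt macd_short macd_long term
instance (macd_short : List Int) (macd_long : List Int) (term : Int) (out : List Int) : Decidable (Spec_calc_across macd_short macd_long term out) := by unfold Spec_calc_across; infer_instance

-- ===== CLAIM (what is proved, stated in full; the proofs are below) =====
def Claim_equal_calc_across : Prop := ∀ (macd_short : List Int) (macd_long : List Int) (term : Int), Dom_calc_across macd_short macd_long term → Pre_calc_across macd_short macd_long term → Spec_calc_across macd_short macd_long term (calc_across macd_short macd_long term)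

-- ===== LEMMAS AND PROOFS =====

-- the current short>long flag at index i
def pvFlag (ms ml : List Int) (i : Nat) : Bool := decide (ms.getD i 0 > ml.getD i 0)
-- the previous flag (True before index 0)
def pvPrev (ms ml : List Int) (i : Nat) : Bool := if i = 0 then true else pvFlag ms ml (i - 1)
-- is i a crossover?
def pvCross (ms ml : List Int) (i : Nat) : Bool := pvFlag ms ml i != pvPrev ms ml i
-- crossovers below n
def pvC (ms ml : List Int) (n : Nat) : List Nat := (List.range n).filter (pvCross ms ml)
-- the value A assigns at day i (common pointwise characterisation)
def pvV (ms ml : List Int) (term : Int) (i : Nat) : Int :=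
  let cs := pvC ms ml (i+1)
  if 1 ≤ cs.length ∧ cs.getD (cs.length - 1) 0 ≠ i ∧ (i : Int) - (cs.getD (cs.length - 1) 0 : Int) ≥ term then 1
  else if 2 ≤ cs.length ∧ (i : Int) - (cs.getD (cs.length - 2) 0 : Int) ≤ term then 2
  else 0

theorem pvC_succ (ms ml : List Int) (n : Nat) :
    pvC ms ml (n+1) = if pvCross ms ml n then pvC ms ml n ++ [n] else pvC ms ml n := by
  simp [pvC, List.range_succ, List.filter_append]
  split <;> simp_all

theorem mem_pvC_iff (ms ml : List Int) {n x : Nat} :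
    x ∈ pvC ms ml n ↔ x < n ∧ pvCross ms ml x = true := by
  simp [pvC, List.mem_filter]

theorem mem_pvC_lt (ms ml : List Int) {n x : Nat} (h : x ∈ pvC ms ml n) : x < n :=
  ((mem_pvC_iff ms ml).mp h).1

theorem pvC_sorted (ms ml : List Int) (n : Nat) : (pvC ms ml n).Pairwise (· < ·) :=
  List.Pairwise.filter _ (List.pairwise_lt_range)

theorem pvC_prefix (ms ml : List Int) {m n : Nat} (h : m ≤ n) :
    pvC ms ml m <+: pvC ms ml n := by
  induction n with
  | zero => interval_cases m; simp
  | succ k ih =>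
    rcases Nat.lt_or_ge m (k+1) with hm | hm
    · refine (ih (Nat.lt_succ_iff.mp hm)).trans ?_
      rw [pvC_succ]
      split <;> simp
    · have : m = k + 1 := le_antisymm h hm
      simp [this]

theorem prefix_getD {l1 l2 : List Nat} (h : l1 <+: l2) {k : Nat} (hk : k < l1.length)
    (d : Nat) : l2.getD k d = l1.getD k d := by
  rw [List.getD_eq_getElem _ _ hk, List.getD_eq_getElem _ _ (Nat.lt_of_lt_of_le hk h.length_le)]
  exact (List.IsPrefix.getElem h hk).symm

theorem reverse_getD {l : List Nat} {k : Nat} (hk : k < l.length) (d : Nat) :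
    l.reverse.getD k d = l.getD (l.length - 1 - k) d := by
  rw [List.getD_eq_getElem _ _ (by simpa using hk),
      List.getD_eq_getElem _ _ (by omega)]
  rw [List.getElem_reverse]

-- crossovers are strictly increasing as listed
theorem pvC_getElem_lt (ms ml : List Int) (n : Nat) {i j : Nat}
    (hj : j < (pvC ms ml n).length) (hij : i < j) :
    (pvC ms ml n)[i]'(by omega) < (pvC ms ml n)[j] :=
  (List.pairwise_iff_getElem.mp (pvC_sorted ms ml n)) i j (by omega) hj hij

-- pvC below the k-th crossover is exactly the first k crossovers
theorem pvC_take (ms ml : List Int) (N : Nat) {k : Nat} (hk : k < (pvC ms ml N).length) :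
    pvC ms ml ((pvC ms ml N)[k]) = (pvC ms ml N).take k := by
  have hckN : (pvC ms ml N)[k] < N := mem_pvC_lt ms ml (List.getElem_mem hk)
  have hpre : pvC ms ml ((pvC ms ml N)[k]) <+: pvC ms ml N := pvC_prefix ms ml (by omega)
  set L := (pvC ms ml ((pvC ms ml N)[k])).length with hL
  have heq : pvC ms ml ((pvC ms ml N)[k]) = (pvC ms ml N).take L := by
    exact List.prefix_iff_eq_take.mp hpre
  have hLk : L = k := by
    rcases Nat.lt_trichotomy L k with h | h | h
    · exfalso
      have hLlen : L < (pvC ms ml N).length := by omega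
      have hcross : pvCross ms ml ((pvC ms ml N)[L]) = true :=
        ((mem_pvC_iff ms ml).mp (List.getElem_mem hLlen)).2
      have hlt : (pvC ms ml N)[L] < (pvC ms ml N)[k] := pvC_getElem_lt ms ml N hk h
      have hmem : (pvC ms ml N)[L] ∈ pvC ms ml ((pvC ms ml N)[k]) :=
        (mem_pvC_iff ms ml).mpr ⟨hlt, hcross⟩
      rw [heq] at hmem
      obtain ⟨j, hj, hje⟩ := List.mem_take_iff_getElem.mp hmem
      have hjL : j < L := lt_of_lt_of_le hj (by simp)
      have : (pvC ms ml N)[j]'(by omega) < (pvC ms ml N)[L] := pvC_getElem_lt ms ml N hLlen hjL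
      omega
    · exact h
    · exfalso
      have : (pvC ms ml N)[k] ∈ pvC ms ml ((pvC ms ml N)[k]) := by
        rw [heq]
        exact List.mem_take_iff_getElem.mpr ⟨k, by omega, rfl⟩
      have := mem_pvC_lt ms ml this
      omega
  rw [heq, hLk]

-- no crossover strictly between two consecutive run starts
theorem pvC_stable (ms ml : List Int) {c i : Nat} (hci : c ≤ i)
    (h : ∀ m, c < m → m ≤ i → pvCross ms ml m = false) :
    pvC ms ml (i+1) = pvC ms ml (c+1) := by
  induction i with
  | zero =>
    interval_cases c
    rfl
  | succ j ih =>
    rcases Nat.lt_or_ge c (j+1) with hc | hc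
    · rw [pvC_succ, h (j+1) hc (by omega)]
      simp only [Bool.false_eq_true, if_false]
      exact ih (by omega) (fun m h1 h2 => h m h1 (by omega))
    · have : c = j + 1 := by omega
      rw [this]

-- ===== A-side invariant =====
theorem hne_lemma (ms ml : List Int) (k : Nat) (K : List Nat)
    (hK : K = pvC ms ml (k+1)) (h1 : 1 ≤ K.length) :
    ((K.getD (K.length - 1) 0 ≠ k) ↔ (pvFlag ms ml k = pvPrev ms ml k)) := by
  by_cases hc : pvCross ms ml k = true
  · have h1' : K = pvC ms ml k ++ [k] := by rw [hK, pvC_succ, if_pos hc]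
    have : K.getD (K.length - 1) 0 = k := by
      rw [h1', List.getD_eq_getElem _ _ (by simp)]
      simp
    simp only [this, ne_eq, not_true_eq_false, false_iff]
    intro heq
    simp [pvCross, heq] at hc
  · have h1' : K = pvC ms ml k := by rw [hK, pvC_succ, if_neg hc]
    have hlt : K.getD (K.length - 1) 0 < k := by
      have : K.getD (K.length - 1) 0 ∈ pvC ms ml k := by
        rw [h1', List.getD_eq_getElem _ _ (by rw [← h1']; omega)]
        exact List.getElem_mem _
      exact mem_pvC_lt ms ml this
    constructor
    · intro _
      simpa [pvCross] using hc
    · intro _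
      omega

theorem set_getD (o : List Int) (m : Nat) (v : Int) (j : Nat) (hj : j < o.length) :
    (o.set m v).getD j 0 = if j = m then v else o.getD j 0 := by
  rw [List.getD_eq_getElem _ _ (by simpa using hj), List.getD_eq_getElem _ _ hj,
      List.getElem_set]
  split <;> split <;> first | rfl | omega

theorem A_inv (ms ml : List Int) (term : Int) (n : Nat) (hn : n ≤ ms.length) :
    ∃ u : List Int,
      (List.range n).foldl (calcAcrossStep ms ml term)
        (true, List.replicate ms.length 0, []) = (pvPrev ms ml n, u, (pvC ms ml n).reverse) ∧
      u.length = ms.length ∧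
      ∀ j, j < ms.length → u.getD j 0 = if j < n then pvV ms ml term j else 0 := by
  induction n with
  | zero =>
    refine ⟨List.replicate ms.length 0, by simp [pvPrev, pvC], by simp, ?_⟩
    intro j hj
    simp [List.getD_eq_getElem, hj]
  | succ k ih =>
    obtain ⟨u, hA, hlen, hpt⟩ := ih (by omega)
    have hkN : k < ms.length := hn
    rw [List.range_succ, List.foldl_append, List.foldl_cons, List.foldl_nil, hA]
    set K := pvC ms ml (k+1) with hK
    have had : (if pvFlag ms ml k != pvPrev ms ml k then k :: (pvC ms ml k).reverse
        else (pvC ms ml k).reverse) = K.reverse := by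
      rw [hK, pvC_succ]
      by_cases hc : pvCross ms ml k = true
      · rw [if_pos (by simpa [pvCross] using hc), if_pos hc]
        simp
      · rw [if_neg (by simpa [pvCross] using hc), if_neg hc]
    have hval : (if 1 ≤ K.length ∧ (k:Int) - (K.reverse.getD 0 0 : Int) ≥ term ∧
          pvFlag ms ml k = pvPrev ms ml k then (1:Int)
        else if 2 ≤ K.length ∧ (k:Int) - (K.reverse.getD 1 0 : Int) ≤ term then 2 else 0)
        = pvV ms ml term k := by
      rw [pvV]
      rw [← hK]
      by_cases h1 : 1 ≤ K.length
      · have e1 : K.reverse.getD 0 0 = K.getD (K.length - 1) 0 := by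
          rw [reverse_getD (by omega) 0]
          norm_num
        have hne := hne_lemma ms ml k K hK h1
        rw [e1]
        by_cases hq : K.getD (K.length - 1) 0 ≠ k ∧ (k:Int) - (K.getD (K.length - 1) 0 : Int) ≥ term
        · rw [if_pos ⟨h1, hq.2, hne.mp hq.1⟩, if_pos ⟨h1, hq.1, hq.2⟩]
        · have hnA : ¬(1 ≤ K.length ∧ (k:Int) - (K.getD (K.length - 1) 0 : Int) ≥ term ∧
              pvFlag ms ml k = pvPrev ms ml k) := by
            rintro ⟨-, hb, hcc⟩
            exact hq ⟨hne.mpr hcc, hb⟩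
          have hnB : ¬(1 ≤ K.length ∧ K.getD (K.length - 1) 0 ≠ k ∧
              (k:Int) - (K.getD (K.length - 1) 0 : Int) ≥ term) := by tauto
          rw [if_neg hnA, if_neg hnB]
          by_cases h2 : 2 ≤ K.length
          · have e2 : K.reverse.getD 1 0 = K.getD (K.length - 2) 0 := by
              rw [reverse_getD (by omega) 0]
              congr 1
            rw [e2]
          · rw [if_neg (by omega), if_neg (by omega)]
      · rw [if_neg (by omega), if_neg (by omega), if_neg (by omega), if_neg (by omega)]
    refine ⟨if 1 ≤ K.length ∧ (k:Int) - (K.reverse.getD 0 0 : Int) ≥ term ∧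
          pvFlag ms ml k = pvPrev ms ml k then u.set k 1
        else if 2 ≤ K.length ∧ (k:Int) - (K.reverse.getD 1 0 : Int) ≤ term then u.set k 2
        else u, ?_, ?_, ?_⟩
    · simp only [calcAcrossStep]
      rw [show decide (ms.getD k 0 > ml.getD k 0) = pvFlag ms ml k from rfl, had,
          show pvPrev ms ml (k+1) = pvFlag ms ml k from by simp [pvPrev]]
      simp only [List.length_reverse]
    · split_ifs <;> simp [hlen]
    · intro j hj
      have hju : j < u.length := by rw [hlen]; exact hj
      by_cases hjk : j = k
      · subst hjk
        rw [if_pos (Nat.lt_succ_self j), ← hval]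
        split_ifs with hc1 hc2
        · rw [set_getD u j 1 j hju]
          simp
        · rw [set_getD u j 2 j hju]
          simp
        · rw [hpt j hj]
          simp
      · have hsame : (if j < k then pvV ms ml term j else 0) =
            (if j < k + 1 then pvV ms ml term j else 0) := by
          by_cases hjlt : j < k
          · rw [if_pos hjlt, if_pos (by omega)]
          · rw [if_neg hjlt, if_neg (by omega)]
        rw [← hsame, ← hpt j hj]
        split_ifs with hc1 hc2
        · rw [set_getD u k 1 j hju, if_neg hjk]
        · rw [set_getD u k 2 j hju, if_neg hjk]
        · rfl

-- ===== B-side lemmas =====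
theorem foldl_set_length (l : List Int) (v : Int) (o : List Int) :
    (l.foldl (fun o i => o.set i.toNat v) o).length = o.length := by
  induction l generalizing o with
  | nil => rfl
  | cons a t ih => simp [List.foldl_cons, ih]

theorem altFill_length (v a b : Int) (o : List Int) : (altFill v a b o).length = o.length :=
  foldl_set_length _ v o

theorem altFill_getD_aux (v b : Int) (n : Nat) : ∀ (a : Int), (b - a).toNat = n → 0 ≤ a →
    ∀ (o : List Int) (j : Nat), j < o.length →
    (altFill v a b o).getD j 0 =
      if a ≤ (j : Int) ∧ (j : Int) < b then v else o.getD j 0 := by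
  induction n with
  | zero =>
    intro a hn ha o j hj
    have hba : b ≤ a := by omega
    have : PySem.List.pyRange a b 1 = [] := by
      rw [PySem.List.pyRange_one]
      have : (b - a).toNat = 0 := by omega
      rw [this]
      rfl
    rw [altFill, this, List.foldl_nil, if_neg (by omega)]
  | succ n ih =>
    intro a hn ha o j hj
    have hab : a < b := by omega
    rw [altFill, PySem.List.pyRange_one_cons hab, List.foldl_cons]
    have h2 := ih (a + 1) (by omega) (by omega) (o.set a.toNat v) j (by simpa using hj)
    rw [altFill] at h2
    rw [h2, set_getD o a.toNat v j hj]
    split_ifs <;> first | rfl | omega | (exfalso; omega)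

theorem altFill_getD (v a b : Int) (o : List Int) (ha : 0 ≤ a) {j : Nat} (hj : j < o.length) :
    (altFill v a b o).getD j 0 =
      if a ≤ (j : Int) ∧ (j : Int) < b then v else o.getD j 0 :=
  altFill_getD_aux v b (b - a).toNat a rfl ha o j hj

theorem startsAux (ms ml : List Int) (n : Nat) :
    (List.range n).foldl (altStartsStep ms ml) (true, []) =
      (pvPrev ms ml n, (pvC ms ml n).map (Nat.cast : Nat → Int)) := by
  induction n with
  | zero => simp [pvPrev, pvC]
  | succ k ih =>
    rw [List.range_succ, List.foldl_append, List.foldl_cons, List.foldl_nil, ih]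
    simp only [altStartsStep]
    rw [show decide (ms.getD k 0 > ml.getD k 0) = pvFlag ms ml k from rfl]
    rw [pvC_succ]
    by_cases hc : pvCross ms ml k = true
    · rw [if_pos (by simpa [pvCross] using hc), if_pos hc]
      simp [pvPrev]
    · rw [if_neg (by simpa [pvCross] using hc), if_neg hc]
      simp [pvPrev]

theorem starts_eq (ms ml : List Int) :
    altStarts ms ml = (pvC ms ml ms.length).map (Nat.cast : Nat → Int) ++ [(ms.length : Int)] := by
  rw [altStarts, startsAux]

-- the k-th entry of the starts table (with the sentinel N at position cr.length)
theorem starts_getD (ms ml : List Int) {k : Nat} (hk : k ≤ (pvC ms ml ms.length).length) :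
    (altStarts ms ml).getD k 0 = ((pvC ms ml ms.length).getD k ms.length : Int) := by
  rw [starts_eq]
  rcases Nat.lt_or_ge k (pvC ms ml ms.length).length with h | h
  · rw [List.getD_eq_getElem?_getD, List.getElem?_append_left (by simpa using h),
        List.getElem?_map, List.getElem?_eq_getElem h, List.getD_eq_getElem _ _ h]
    rfl
  · have hke : k = (pvC ms ml ms.length).length := by omega
    subst hke
    rw [List.getD_eq_getElem _ _ (by simp),
        List.getElem_append_right (by simp)]
    simp [List.getD_eq_getElem?_getD, List.getElem?_eq_none (by omega)]

theorem cr_le (ms ml : List Int) {i j : Nat} (hj : j < (pvC ms ml ms.length).length)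
    (hij : i ≤ j) : (pvC ms ml ms.length)[i]'(by omega) ≤ (pvC ms ml ms.length)[j] := by
  rcases Nat.lt_or_ge i j with h | h
  · exact le_of_lt (pvC_getElem_lt ms ml ms.length hj h)
  · have : i = j := by omega
    subst this
    rfl

theorem thr_le (ms ml : List Int) {k : Nat} (hk : k ≤ (pvC ms ml ms.length).length) :
    (pvC ms ml ms.length).getD k ms.length ≤ ms.length := by
  rcases Nat.lt_or_ge k (pvC ms ml ms.length).length with h | h
  · rw [List.getD_eq_getElem _ _ h]
    exact le_of_lt (mem_pvC_lt ms ml (List.getElem_mem h))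
  · rw [List.getD_eq_getElem?_getD, List.getElem?_eq_none (by omega)]
    rfl

theorem thr_lt (ms ml : List Int) {k : Nat} (hk : k < (pvC ms ml ms.length).length) :
    (pvC ms ml ms.length)[k] < (pvC ms ml ms.length).getD (k+1) ms.length := by
  rcases Nat.lt_or_ge (k+1) (pvC ms ml ms.length).length with h | h
  · rw [List.getD_eq_getElem _ _ h]
    exact pvC_getElem_lt ms ml ms.length h (by omega)
  · rw [List.getD_eq_getElem?_getD, List.getElem?_eq_none (by omega)]
    exact mem_pvC_lt ms ml (List.getElem_mem hk)

-- within segment k every crossover up to j is one of the first k+1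
theorem seg_pvC (ms ml : List Int) {k j : Nat} (hk : k < (pvC ms ml ms.length).length)
    (h1 : (pvC ms ml ms.length)[k] ≤ j)
    (h2 : j < (pvC ms ml ms.length).getD (k+1) ms.length) :
    pvC ms ml (j+1) = (pvC ms ml ms.length).take (k+1) := by
  have hstable : pvC ms ml (j+1) = pvC ms ml ((pvC ms ml ms.length)[k]+1) := by
    apply pvC_stable ms ml h1
    intro m hm1 hm2
    by_contra hcm
    have hcm' : pvCross ms ml m = true := by
      simpa using hcm
    have hmN : m < ms.length := by
      have hth := thr_le ms ml (k := k+1) (by omega)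
      omega
    have hmem : m ∈ pvC ms ml ms.length := (mem_pvC_iff ms ml).mpr ⟨hmN, hcm'⟩
    obtain ⟨i, hi, hie⟩ := List.mem_iff_getElem.mp hmem
    rcases Nat.lt_or_ge i (k+1) with hik | hik
    · have hmk : m ≤ (pvC ms ml ms.length)[k] := by
        have h := cr_le ms ml hk (i := i) (by omega)
        rw [hie] at h
        exact h
      omega
    · have hk1 : k + 1 < (pvC ms ml ms.length).length := by omega
      have hle : (pvC ms ml ms.length)[k+1] ≤ m := by
        have h := cr_le ms ml hi hik
        rw [hie] at h
        exact h
      rw [List.getD_eq_getElem _ _ hk1] at h2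
      omega
  rw [hstable, pvC_succ,
      if_pos (((mem_pvC_iff ms ml).mp (List.getElem_mem hk)).2), pvC_take ms ml ms.length hk,
      List.take_succ, List.getElem?_eq_getElem hk]
  rfl

-- before the first crossover nothing is flagged
theorem V_before_first (ms ml : List Int) (term : Int) {j : Nat} (hj : j < ms.length)
    (hlt : j < (pvC ms ml ms.length).getD 0 ms.length) : pvV ms ml term j = 0 := by
  have hempty : pvC ms ml (j+1) = [] := by
    rw [List.eq_nil_iff_forall_not_mem]
    intro x hx
    obtain ⟨hxj, hcx⟩ := (mem_pvC_iff ms ml).mp hx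
    have hxN : x < ms.length := by omega
    have hmem : x ∈ pvC ms ml ms.length := (mem_pvC_iff ms ml).mpr ⟨hxN, hcx⟩
    obtain ⟨i, hi, hie⟩ := List.mem_iff_getElem.mp hmem
    have h0 : (pvC ms ml ms.length)[0]'(by omega) ≤ x := by
      rw [← hie]
      exact cr_le ms ml hi (by omega)
    rw [List.getD_eq_getElem _ _ (by omega)] at hlt
    omega
  simp [pvV, hempty]

theorem getD_irrel {l : List Nat} {i : Nat} (h : i < l.length) (d1 d2 : Nat) :
    l.getD i d1 = l.getD i d2 := by
  rw [List.getD_eq_getElem _ _ h, List.getD_eq_getElem _ _ h]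

theorem thr_lt' (ms ml : List Int) {k : Nat} (hk : k < (pvC ms ml ms.length).length) :
    (pvC ms ml ms.length).getD k ms.length < (pvC ms ml ms.length).getD (k+1) ms.length := by
  rw [List.getD_eq_getElem _ _ hk]
  exact thr_lt ms ml hk

theorem take_getD (ms ml : List Int) {k i : Nat} (hk : k < (pvC ms ml ms.length).length)
    (hik : i ≤ k) :
    ((pvC ms ml ms.length).take (k+1)).getD i 0 = (pvC ms ml ms.length).getD i ms.length := by
  have hl : ((pvC ms ml ms.length).take (k+1)).length = k + 1 := by
    simp
    omega
  rw [← prefix_getD (List.take_prefix (k+1) (pvC ms ml ms.length)) (by omega) 0,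
      getD_irrel (by omega) 0 ms.length]

-- pvV inside segment k, in terms of the segment's own crossover and its predecessor
theorem seg_V (ms ml : List Int) (term : Int) {k j : Nat}
    (hk : k < (pvC ms ml ms.length).length)
    (h1 : (pvC ms ml ms.length).getD k ms.length ≤ j)
    (h2 : j < (pvC ms ml ms.length).getD (k+1) ms.length) :
    pvV ms ml term j =
      if (pvC ms ml ms.length).getD k ms.length ≠ j ∧
          (j : Int) - ((pvC ms ml ms.length).getD k ms.length : Int) ≥ term then 1
      else if 1 ≤ k ∧
          (j : Int) - ((pvC ms ml ms.length).getD (k-1) ms.length : Int) ≤ term then 2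
      else 0 := by
  have hcj : pvC ms ml (j+1) = (pvC ms ml ms.length).take (k+1) := by
    apply seg_pvC ms ml hk _ h2
    rw [← List.getD_eq_getElem _ _ hk]
    exact h1
  have hl : ((pvC ms ml ms.length).take (k+1)).length = k + 1 := by
    simp
    omega
  have e1 : ((pvC ms ml ms.length).take (k+1)).getD (k+1-1) 0 =
      (pvC ms ml ms.length).getD k ms.length := take_getD ms ml hk (by omega)
  have e2 : ((pvC ms ml ms.length).take (k+1)).getD (k+1-2) 0 =
      (pvC ms ml ms.length).getD (k-1) ms.length := by
    rcases Nat.eq_zero_or_pos k with h0 | h0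
    · subst h0
      exact take_getD ms ml hk (by omega)
    · have : k + 1 - 2 = k - 1 := by omega
      rw [this]
      exact take_getD ms ml hk (by omega)
  rw [pvV]
  simp only [hcj, hl, e1, e2]
  split_ifs <;> first | rfl | omega

theorem B_inv (ms ml : List Int) (term : Int) (k : Nat)
    (hk : k ≤ (pvC ms ml ms.length).length) :
    ((List.range k).foldl (altSegStep term (altStarts ms ml))
        (List.replicate ms.length 0)).length = ms.length ∧
      ∀ j, j < ms.length →
        ((List.range k).foldl (altSegStep term (altStarts ms ml))
            (List.replicate ms.length 0)).getD j 0 =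
          if j < (pvC ms ml ms.length).getD k ms.length then pvV ms ml term j else 0 := by
  induction k with
  | zero =>
    refine ⟨by simp, ?_⟩
    intro j hj
    rw [List.range_zero, List.foldl_nil, List.getD_eq_getElem _ _ (by simpa using hj)]
    simp only [List.getElem_replicate]
    by_cases hcase : j < (pvC ms ml ms.length).getD 0 ms.length
    · rw [if_pos hcase, V_before_first ms ml term hj hcase]
    · rw [if_neg hcase]
  | succ k ih =>
    have hkl : k < (pvC ms ml ms.length).length := by omega
    obtain ⟨hlen, hpt⟩ := ih (by omega)
    rw [List.range_succ, List.foldl_append, List.foldl_cons, List.foldl_nil]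
    generalize hO : (List.range k).foldl (altSegStep term (altStarts ms ml))
        (List.replicate ms.length 0) = O at hlen hpt
    have hSk : (altStarts ms ml).getD k 0 =
        ((pvC ms ml ms.length).getD k ms.length : Int) := starts_getD ms ml (by omega)
    have hSk1 : (altStarts ms ml).getD (k+1) 0 =
        ((pvC ms ml ms.length).getD (k+1) ms.length : Int) := starts_getD ms ml (by omega)
    have hSkm : (altStarts ms ml).getD (k-1) 0 =
        ((pvC ms ml ms.length).getD (k-1) ms.length : Int) := starts_getD ms ml (by omega)
    have hcn : (pvC ms ml ms.length).getD k ms.length <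
        (pvC ms ml ms.length).getD (k+1) ms.length := thr_lt' ms ml hkl
    have hnle : (pvC ms ml ms.length).getD (k+1) ms.length ≤ ms.length :=
      thr_le ms ml (by omega)
    have hpm : 1 ≤ k → (pvC ms ml ms.length).getD (k-1) ms.length <
        (pvC ms ml ms.length).getD k ms.length := by
      intro h1
      have := thr_lt' ms ml (k := k-1) (by omega)
      have hke : k - 1 + 1 = k := by omega
      rwa [hke] at this
    simp only [altSegStep, hSk, hSk1, hSkm]
    have hlen1 : (altFill 1
        (max (((pvC ms ml ms.length).getD k ms.length : Int) + term)
          (((pvC ms ml ms.length).getD k ms.length : Int) + 1))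
        ((pvC ms ml ms.length).getD (k+1) ms.length : Int) O).length = ms.length := by
      rw [altFill_length, hlen]
    constructor
    · split_ifs <;> simp [altFill_length, hlen]
    · intro j hj
      have hjO : j < O.length := by omega
      have hOj := hpt j hj
      have hmax0 : (0:Int) ≤ max (((pvC ms ml ms.length).getD k ms.length : Int) + term)
            (((pvC ms ml ms.length).getD k ms.length : Int) + 1) := by
        have h := le_max_right (((pvC ms ml ms.length).getD k ms.length : Int) + term)
          (((pvC ms ml ms.length).getD k ms.length : Int) + 1)
        have := Int.natCast_nonneg ((pvC ms ml ms.length).getD k ms.length)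
        omega
      have hfill1 : ∀ jj : Nat, jj < O.length →
          (altFill 1
            (max (((pvC ms ml ms.length).getD k ms.length : Int) + term)
              (((pvC ms ml ms.length).getD k ms.length : Int) + 1))
            ((pvC ms ml ms.length).getD (k+1) ms.length : Int) O).getD jj 0 =
          if max (((pvC ms ml ms.length).getD k ms.length : Int) + term)
              (((pvC ms ml ms.length).getD k ms.length : Int) + 1) ≤ (jj : Int) ∧
              (jj : Int) < ((pvC ms ml ms.length).getD (k+1) ms.length : Int) then 1
          else O.getD jj 0 := fun jj hjj => altFill_getD _ _ _ O hmax0 hjj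
      by_cases hk1 : 1 ≤ k
      · rw [if_pos hk1]
        have hinner : ∀ jj : Nat, jj < O.length →
            ((if ((pvC ms ml ms.length).getD k ms.length : Int) -
                ((pvC ms ml ms.length).getD (k-1) ms.length : Int) ≤ term then
              (altFill 1
                (max (((pvC ms ml ms.length).getD k ms.length : Int) + term)
                  (((pvC ms ml ms.length).getD k ms.length : Int) + 1))
                ((pvC ms ml ms.length).getD (k+1) ms.length : Int) O).set
                (((pvC ms ml ms.length).getD k ms.length : Int)).toNat 2
            else
              (altFill 1
                (max (((pvC ms ml ms.length).getD k ms.length : Int) + term)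
                  (((pvC ms ml ms.length).getD k ms.length : Int) + 1))
                ((pvC ms ml ms.length).getD (k+1) ms.length : Int) O)).getD jj 0) =
            if ((pvC ms ml ms.length).getD k ms.length : Int) -
                ((pvC ms ml ms.length).getD (k-1) ms.length : Int) ≤ term ∧
                jj = (pvC ms ml ms.length).getD k ms.length then 2
            else (altFill 1
                (max (((pvC ms ml ms.length).getD k ms.length : Int) + term)
                  (((pvC ms ml ms.length).getD k ms.length : Int) + 1))
                ((pvC ms ml ms.length).getD (k+1) ms.length : Int) O).getD jj 0 := by
          intro jj hjj
          have htn : (((pvC ms ml ms.length).getD k ms.length : Int)).toNat =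
              (pvC ms ml ms.length).getD k ms.length := Int.toNat_natCast _
          have hjjf : jj < (altFill 1
              (max (((pvC ms ml ms.length).getD k ms.length : Int) + term)
                (((pvC ms ml ms.length).getD k ms.length : Int) + 1))
              ((pvC ms ml ms.length).getD (k+1) ms.length : Int) O).length := by
            rw [altFill_length]
            exact hjj
          split_ifs with hc hjc hjc
          · rw [set_getD _ _ _ jj hjjf, htn, if_pos hjc.2]
          · have hne : ¬ (jj = (((pvC ms ml ms.length).getD k ms.length : Int)).toNat) := by
              rw [htn]
              intro he
              exact hjc ⟨hc, he⟩
            rw [set_getD _ _ _ jj hjjf, if_neg hne]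
          · exact absurd hjc.1 hc
          · rfl
        rw [altFill_getD _ _ _ _
            (by have := Int.natCast_nonneg ((pvC ms ml ms.length).getD k ms.length); omega)
            (show j < _ by split_ifs <;> simp [altFill_length, hlen, List.length_set] <;> omega),
          hinner j hjO, hfill1 j hjO, hOj]
        by_cases hjc : j < (pvC ms ml ms.length).getD k ms.length
        · have hjc' : ((j:Int)) < ((pvC ms ml ms.length).getD k ms.length : Int) := by
            exact_mod_cast hjc
          split_ifs <;> first | rfl | omega
        · by_cases hjn : j < (pvC ms ml ms.length).getD (k+1) ms.length
          · rw [seg_V ms ml term hkl (by omega) hjn]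
            have hc1 : ¬ ((j:Int) < ((pvC ms ml ms.length).getD k ms.length : Int)) := by
              push_cast
              omega
            have hc2 : ((j:Int)) < ((pvC ms ml ms.length).getD (k+1) ms.length : Int) := by
              exact_mod_cast hjn
            split_ifs <;> first | rfl | omega
          · have hc2 : ¬ ((j:Int) < ((pvC ms ml ms.length).getD (k+1) ms.length : Int)) := by
              push_cast
              omega
            have hc1 : ¬ ((j:Int) < ((pvC ms ml ms.length).getD k ms.length : Int)) := by
              push_cast
              omega
            split_ifs <;> first | rfl | omega
      · rw [if_neg hk1]
        rw [hfill1 j hjO, hOj]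
        by_cases hjc : j < (pvC ms ml ms.length).getD k ms.length
        · have hjc' : ((j:Int)) < ((pvC ms ml ms.length).getD k ms.length : Int) := by
            exact_mod_cast hjc
          split_ifs <;> first | rfl | omega
        · by_cases hjn : j < (pvC ms ml ms.length).getD (k+1) ms.length
          · rw [seg_V ms ml term hkl (by omega) hjn]
            have hc1 : ¬ ((j:Int) < ((pvC ms ml ms.length).getD k ms.length : Int)) := by
              push_cast
              omega
            have hc2 : ((j:Int)) < ((pvC ms ml ms.length).getD (k+1) ms.length : Int) := by
              exact_mod_cast hjn
            split_ifs <;> first | rfl | omega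
          · have hc2 : ¬ ((j:Int) < ((pvC ms ml ms.length).getD (k+1) ms.length : Int)) := by
              push_cast
              omega
            have hc1 : ¬ ((j:Int) < ((pvC ms ml ms.length).getD k ms.length : Int)) := by
              push_cast
              omega
            split_ifs <;> first | rfl | omega

theorem pv_main (ms ml : List Int) (term : Int) :
    calc_across ms ml term = calc_across_alt ms ml term := by
  obtain ⟨u, hA, hlen, hpt⟩ := A_inv ms ml term ms.length (le_refl _)
  obtain ⟨hlenB, hptB⟩ := B_inv ms ml term (pvC ms ml ms.length).length (le_refl _)
  have hSlen : (altStarts ms ml).length - 1 = (pvC ms ml ms.length).length := by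
    rw [starts_eq]
    simp
  have hthr : (pvC ms ml ms.length).getD (pvC ms ml ms.length).length ms.length = ms.length := by
    rw [List.getD_eq_getElem?_getD, List.getElem?_eq_none (le_refl _)]
    rfl
  rw [hthr] at hptB
  simp only [calc_across, calc_across_alt, hSlen]
  rw [hA]
  apply List.ext_getElem
  · rw [hlen, hlenB]
  · intro i h1 h2
    have hiN : i < ms.length := by
      rw [← hlen]
      exact h1
    rw [← List.getD_eq_getElem _ 0, ← List.getD_eq_getElem _ 0, hpt i hiN, hptB i hiN]

-- ===== VERDICT (by name: the statement is the Claim_ definition above) =====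
theorem calc_across_spec : Claim_equal_calc_across := by
  intro ms ml term _ _
  unfold Spec_calc_across
  exact pv_main ms ml term
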